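-- pv_equiv track=rewrite | github.com/FedML-AI/FedML | python/fedml/fa/data/utils.py | equally_partition_a_dataset_according_to_users
-- ===== SOURCE A (Python) =====
-- import math
--
-- def equally_partition_a_dataset_according_to_users(client_num_in_total, dataset):
--     """
--     Equally partition a dataset among clients based on the number of users.
--
--     Args:
--         client_num_in_total (int): The total number of clients.
--         dataset (dict): The dataset organized by user IDs.
--
--     Returns:
--         tuple: A tuple containing the total dataset size, a dictionary of local data counts per client,
--                and a dictionary of local data for each client.
--     """
--     user_num_for_one_client = int(math.ceil(len(dataset) / client_num_in_total))
--     local_data_dict = dict()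
--     train_data_local_num_dict = dict()
--     datasize = 0
--     user_list = list(dataset.keys())
--     user_list_counter = 0
--     for i in range(client_num_in_total):
--         local_data_dict[i] = list()
--         client_data_num = 0
--         for j in range(user_num_for_one_client):
--             if user_list_counter >= len(user_list):
--                 break
--             local_data_dict[i].extend(dataset[user_list[user_list_counter]])
--             client_data_num += len(dataset[user_list[user_list_counter]])
--             user_list_counter += 1
--         train_data_local_num_dict[i] = client_data_num
--         datasize += train_data_local_num_dict[i]
--     return (
--         datasize,
--         train_data_local_num_dict,
--         local_data_dict,
--     )
-- ===== SOURCE B (Python) =====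
-- import math
--
-- def equally_partition_a_dataset_according_to_users(client_num_in_total, dataset):
--     # Slice-based partition: each client i gets keys[i*chunk:(i+1)*chunk], no shared counter.
--     chunk = int(math.ceil(len(dataset) / client_num_in_total))
--     keys = list(dataset.keys())
--     local_data_dict = {}
--     train_data_local_num_dict = {}
--     datasize = 0
--     for i in range(client_num_in_total):
--         group = keys[i * chunk:(i + 1) * chunk]
--         records = [x for k in group for x in dataset[k]]
--         datasize += len(records)
--         train_data_local_num_dict[i] = len(records)
--         local_data_dict[i] = records
--     return (
--         datasize,
--         train_data_local_num_dict,
--         local_data_dict,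
--     )
-- ===== Notes on version B (the rewrite author's own statement) =====
-- stated objective: simpler
-- what changed: Replaces the shared user_list_counter state machine with inner break by stateless arithmetic slice bounds: client i simply gets keys[i*chunk:(i+1)*chunk] and its records are built by one comprehension.
import Mathlib
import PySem

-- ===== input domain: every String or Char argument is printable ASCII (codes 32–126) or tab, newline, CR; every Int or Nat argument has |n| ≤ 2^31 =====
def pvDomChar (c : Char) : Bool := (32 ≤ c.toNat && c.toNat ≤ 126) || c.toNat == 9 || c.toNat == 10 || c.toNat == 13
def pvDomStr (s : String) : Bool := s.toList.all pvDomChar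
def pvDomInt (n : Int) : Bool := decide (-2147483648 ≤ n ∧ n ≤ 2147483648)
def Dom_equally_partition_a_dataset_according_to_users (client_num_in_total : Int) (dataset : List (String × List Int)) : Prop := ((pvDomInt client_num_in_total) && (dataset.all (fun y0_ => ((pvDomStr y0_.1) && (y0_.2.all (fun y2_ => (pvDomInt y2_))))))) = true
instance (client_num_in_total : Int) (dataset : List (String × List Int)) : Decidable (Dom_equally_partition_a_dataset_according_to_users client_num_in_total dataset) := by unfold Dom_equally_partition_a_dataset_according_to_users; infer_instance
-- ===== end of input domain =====

-- B replaces A's shared user_list_counter + inner break with arithmetic slice bounds (objective: simpler).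

-- ===== PORT A =====
-- dataset[k]: k always comes from dataset's own keys, so the KeyError default [] is unreachable
def pvLookupA (dataset : List (String × List Int)) (k : String) : List Int :=
  PySem.Dict.getD (PySem.Dict.mk dataset) k []

-- the inner 'for j in range(user_num_for_one_client)' loop with its break; fuel = the range length
def pvInnerA (dataset : List (String × List Int)) (keys : List String) :
    Nat → Nat → List Int → Int → (List Int × Int × Nat)
  | 0, counter, acc, cn => (acc, cn, counter)
  | fuel + 1, counter, acc, cn =>
    if keys.length ≤ counter then (acc, cn, counter)      -- if user_list_counter >= len(user_list): break
    else
      let vals := pvLookupA dataset (keys.getD counter "")  -- index guarded in range, so getD's default is unreachable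
      pvInnerA dataset keys fuel (counter + 1) (acc ++ vals) (cn + (vals.length : Int))

-- one iteration of 'for i in range(client_num_in_total)'; local_data_dict[i] is accumulated as a
-- list by the inner loop (Python's in-place extends) and stored once
def pvStepA (dataset : List (String × List Int)) (keys : List String) (K : Nat)
    (st : (PySem.Dict Int (List Int)) × (PySem.Dict Int Int) × Int × Nat) (i : Int) :
    (PySem.Dict Int (List Int)) × (PySem.Dict Int Int) × Int × Nat :=
  let r := pvInnerA dataset keys K st.2.2.2 [] 0
  (st.1.insert i r.1, st.2.1.insert i r.2.1, st.2.2.1 + r.2.1, r.2.2)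

def equally_partition_a_dataset_according_to_users (client_num_in_total : Int) (dataset : List (String × List Int)) : Int × (List (Int × Int)) × (List (Int × List Int)) :=
  -- int(math.ceil(len(dataset) / client_num_in_total)) = -((-len) // c), exact at these magnitudes
  let chunk : Int := -(PySem.Int.floordiv (-(dataset.length : Int)) client_num_in_total)
  let keys := dataset.map Prod.fst
  let st := (PySem.List.pyRange 0 client_num_in_total 1).foldl
    (fun st i => pvStepA dataset keys chunk.toNat st i)
    (PySem.Dict.mk [], PySem.Dict.mk [], 0, 0)
  (st.2.2.1, st.2.1.items, st.1.items)

-- ===== PORT B =====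
def pvLookupB (dataset : List (String × List Int)) (k : String) : List Int :=
  PySem.Dict.getD (PySem.Dict.mk dataset) k []

-- one iteration of B's loop: slice the key list, flatten the records of the group
def pvStepB (dataset : List (String × List Int)) (keys : List String) (chunk : Int)
    (st : Int × (PySem.Dict Int Int) × (PySem.Dict Int (List Int))) (i : Int) :
    Int × (PySem.Dict Int Int) × (PySem.Dict Int (List Int)) :=
  let group := PySem.List.slice keys (some (i * chunk)) (some ((i + 1) * chunk))
  let records := group.flatMap (pvLookupB dataset)
  (st.1 + (records.length : Int), st.2.1.insert i (records.length : Int), st.2.2.insert i records)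

def equally_partition_a_dataset_according_to_users_alt (client_num_in_total : Int) (dataset : List (String × List Int)) : Int × (List (Int × Int)) × (List (Int × List Int)) :=
  let chunk : Int := -(PySem.Int.floordiv (-(dataset.length : Int)) client_num_in_total)
  let keys := dataset.map Prod.fst
  let st := (PySem.List.pyRange 0 client_num_in_total 1).foldl
    (fun st i => pvStepB dataset keys chunk st i)
    (0, PySem.Dict.mk [], PySem.Dict.mk [])
  (st.1, st.2.1.items, st.2.2.items)

-- ===== PRECONDITION & SPEC =====
-- client_num_in_total = 0 raises ZeroDivisionError in A (and in B); nothing else is excluded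
def Pre_equally_partition_a_dataset_according_to_users (client_num_in_total : Int) (dataset : List (String × List Int)) : Prop :=
  client_num_in_total ≠ 0
instance (client_num_in_total : Int) (dataset : List (String × List Int)) : Decidable (Pre_equally_partition_a_dataset_according_to_users client_num_in_total dataset) := by unfold Pre_equally_partition_a_dataset_according_to_users; infer_instance

def pvWitness_equally_partition_a_dataset_according_to_users : Int × (List (String × List Int)) :=
  (2, [("a", [1, 2]), ("b", [3]), ("c", [4])])

def Spec_equally_partition_a_dataset_according_to_users (client_num_in_total : Int) (dataset : List (String × List Int)) (out : Int × (List (Int × Int)) × (List (Int × List Int))) : Prop := out = equally_partition_a_dataset_according_to_users_alt client_num_in_total dataset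
instance (client_num_in_total : Int) (dataset : List (String × List Int)) (out : Int × (List (Int × Int)) × (List (Int × List Int))) : Decidable (Spec_equally_partition_a_dataset_according_to_users client_num_in_total dataset out) := by unfold Spec_equally_partition_a_dataset_according_to_users; infer_instance

-- ===== CLAIM (what is proved, stated in full; the proofs are below) =====
def Claim_equal_equally_partition_a_dataset_according_to_users : Prop := ∀ (client_num_in_total : Int) (dataset : List (String × List Int)), Dom_equally_partition_a_dataset_according_to_users client_num_in_total dataset → Pre_equally_partition_a_dataset_according_to_users client_num_in_total dataset → Spec_equally_partition_a_dataset_according_to_users client_num_in_total dataset (equally_partition_a_dataset_according_to_users client_num_in_total dataset)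

-- ===== LEMMAS AND PROOFS =====

-- the values a client collects: the next K keys from position `counter`
def pvFlat (dataset : List (String × List Int)) (keys : List String) (counter K : Nat) : List Int :=
  ((keys.drop counter).take K).flatMap (pvLookupA dataset)

lemma pvInnerA_spec (dataset : List (String × List Int)) (keys : List String) :
    ∀ (K counter : Nat) (acc : List Int) (cn : Int),
      pvInnerA dataset keys K counter acc cn =
        (acc ++ pvFlat dataset keys counter K,
         cn + ((pvFlat dataset keys counter K).length : Int),
         counter + min K (keys.length - counter)) := by
  intro K
  induction K with
  | zero => intro counter acc cn; simp [pvInnerA, pvFlat]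
  | succ K ih =>
    intro counter acc cn
    by_cases h : keys.length ≤ counter
    · have hd : keys.drop counter = [] := List.drop_eq_nil_of_le h
      simp [pvInnerA, h, pvFlat, hd]
    · rw [not_le] at h
      have hd : keys.drop counter = keys[counter] :: keys.drop (counter + 1) :=
        (List.getElem_cons_drop h).symm
      have hget : keys.getD counter "" = keys[counter] := List.getD_eq_getElem keys "" h
      simp only [pvInnerA, if_neg (by omega : ¬ keys.length ≤ counter), hget, ih]
      simp only [Prod.mk.injEq]
      refine ⟨?_, ?_, by omega⟩
      · unfold pvFlat
        rw [hd, List.take_succ_cons, List.flatMap_cons, List.append_assoc]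
      · unfold pvFlat
        rw [hd, List.take_succ_cons, List.flatMap_cons, List.length_append]
        push_cast
        ring

lemma pvDropMin {α : Type} (xs : List α) (a : Nat) :
    xs.drop (min a xs.length) = xs.drop a := by
  rcases le_total a xs.length with h | h
  · rw [min_eq_left h]
  · rw [min_eq_right h, List.drop_length, List.drop_eq_nil_of_le h]

lemma pvGroup_eq (keys : List String) (K s : Nat) :
    PySem.List.slice keys (some ((s : Int) * (K : Int))) (some (((s : Int) + 1) * (K : Int)))
      = (keys.drop (min (s * K) keys.length)).take K := by
  have h1 : ((s : Int) * (K : Int)) = ((s * K : Nat) : Int) := by push_cast; ring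
  have h2 : (((s : Int) + 1) * (K : Int)) = (((s + 1) * K : Nat) : Int) := by push_cast; ring
  rw [h1, h2, PySem.List.slice_natCast, pvDropMin]
  congr 1
  have : (s + 1) * K = s * K + K := by ring
  omega

lemma pvLoop (dataset : List (String × List Int)) (keys : List String) (K : Nat) :
    ∀ (m s : Nat) (L : PySem.Dict Int (List Int)) (Nd : PySem.Dict Int Int) (ds : Int),
      (List.range' s m).foldl (fun st (k : Nat) => pvStepA dataset keys K st (k : Int))
          (L, Nd, ds, min (s * K) keys.length)
        = (((List.range' s m).foldl (fun st (k : Nat) => pvStepB dataset keys (K : Int) st (k : Int)) (ds, Nd, L)).2.2,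
           ((List.range' s m).foldl (fun st (k : Nat) => pvStepB dataset keys (K : Int) st (k : Int)) (ds, Nd, L)).2.1,
           ((List.range' s m).foldl (fun st (k : Nat) => pvStepB dataset keys (K : Int) st (k : Int)) (ds, Nd, L)).1,
           min ((s + m) * K) keys.length) := by
  intro m
  induction m with
  | zero => intro s L Nd ds; simp [List.range']
  | succ m ih =>
    intro s L Nd ds
    rw [List.range'_succ]
    have hrec : pvFlat dataset keys (min (s * K) keys.length) K
        = (PySem.List.slice keys (some ((s : Int) * (K : Int))) (some (((s : Int) + 1) * (K : Int)))).flatMap (pvLookupB dataset) := by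
      rw [pvGroup_eq]
      rfl
    have hstepA : pvStepA dataset keys K (L, Nd, ds, min (s * K) keys.length) (s : Int)
        = (L.insert (s : Int) (pvFlat dataset keys (min (s * K) keys.length) K),
           Nd.insert (s : Int) ((pvFlat dataset keys (min (s * K) keys.length) K).length : Int),
           ds + ((pvFlat dataset keys (min (s * K) keys.length) K).length : Int),
           min ((s + 1) * K) keys.length) := by
      simp only [pvStepA, pvInnerA_spec]
      have : min (s * K) keys.length + min K (keys.length - min (s * K) keys.length)
          = min ((s + 1) * K) keys.length := by
        have : (s + 1) * K = s * K + K := by ring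
        omega
      simp [this]
    have hstepB : pvStepB dataset keys (K : Int) (ds, Nd, L) (s : Int)
        = (ds + ((pvFlat dataset keys (min (s * K) keys.length) K).length : Int),
           Nd.insert (s : Int) ((pvFlat dataset keys (min (s * K) keys.length) K).length : Int),
           L.insert (s : Int) (pvFlat dataset keys (min (s * K) keys.length) K)) := by
      simp only [pvStepB, hrec]
    simp only [List.foldl_cons, hstepA, hstepB]
    have := ih (s + 1)
      (L.insert (s : Int) (pvFlat dataset keys (min (s * K) keys.length) K))
      (Nd.insert (s : Int) ((pvFlat dataset keys (min (s * K) keys.length) K).length : Int))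
      (ds + ((pvFlat dataset keys (min (s * K) keys.length) K).length : Int))
    rw [this]
    have harith : (s + 1 + m) = (s + (m + 1)) := by omega
    rw [harith]

-- ===== VERDICT (by name: the statement is the Claim_ definition above) =====
theorem equally_partition_a_dataset_according_to_users_spec : Claim_equal_equally_partition_a_dataset_according_to_users := by
  intro c dataset _ hc
  unfold Spec_equally_partition_a_dataset_according_to_users
  unfold equally_partition_a_dataset_according_to_users equally_partition_a_dataset_according_to_users_alt
  rcases lt_trichotomy c 0 with hlt | heq | hgt
  · dsimp only
    rw [PySem.List.pyRange_one_eq_nil (le_of_lt hlt)]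
    simp
  · exact absurd heq hc
  · -- c > 0 : chunk ≥ 0
    dsimp only
    set chunk : Int := -(PySem.Int.floordiv (-(dataset.length : Int)) c) with hchunkdef
    have hnn : 0 ≤ chunk := by
      rw [hchunkdef, PySem.Int.floordiv_eq_ediv_of_pos hgt]
      have hl := Int.natCast_nonneg dataset.length
      have h0 : (-(dataset.length : Int)) / c ≤ 0 := by
        calc (-(dataset.length : Int)) / c ≤ 0 / c := Int.ediv_le_ediv hgt (by omega)
          _ = 0 := Int.zero_ediv c
      omega
    obtain ⟨K, hKeq⟩ : ∃ K : Nat, chunk = (K : Int) := ⟨chunk.toNat, (Int.toNat_of_nonneg hnn).symm⟩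
    rw [PySem.List.pyRange_one 0 c]
    simp only [List.foldl_map, zero_add, sub_zero, hKeq, Int.toNat_natCast]
    rw [List.range_eq_range']
    have hmain := pvLoop dataset (dataset.map Prod.fst) K c.toNat 0 (PySem.Dict.mk []) (PySem.Dict.mk []) 0
    simp only [Nat.zero_mul, Nat.zero_min, Nat.zero_add] at hmain
    rw [hmain]
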